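-- pv_equiv track=rewrite | github.com/KrushnaSonwane/LeetCode-Solutions | 1981-minimize-the-difference-between-target-and-chosen-elements/1981-minimize-the-difference-between-target-and-chosen-elements.py | minimizeTheDifference
-- ===== SOURCE A (Python) =====
-- from typing import List
--
-- def minimizeTheDifference(mat: List[List[int]], target: int) -> int:
--     hashT = set({0})
--     for li in mat:
--         newHashT = set()
--         for num in li:
--             for val in hashT:
--                 newHashT.add(val+num)
--         hashT = newHashT
--     return min(abs(target-num) for num in hashT)
-- ===== SOURCE B (Python) =====
-- from typing import List
--
-- def minimizeTheDifference(mat: List[List[int]], target: int) -> int: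
--     # Recursive decomposition: the set of achievable sums of rows[i:] is built
--     # suffix-first by a recursion instead of A's forward loop over rows.
--     def sums(rows):
--         if not rows:
--             return {0}
--         rest = sums(rows[1:])
--         return {s + x for x in rows[0] for s in rest}
--     return min(abs(target - s) for s in sums(mat))
-- ===== Notes on version B (the rewrite author's own statement) =====
-- stated objective: alternative
-- what changed: A's iterative forward loop that rebuilds a prefix-sum set row by row is replaced by a recursion that computes the suffix-sum set of the remaining rows and combines it with the first row via a set comprehension; same reachable-sum set, different traversal direction and decomposition.
import Mathlib
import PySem

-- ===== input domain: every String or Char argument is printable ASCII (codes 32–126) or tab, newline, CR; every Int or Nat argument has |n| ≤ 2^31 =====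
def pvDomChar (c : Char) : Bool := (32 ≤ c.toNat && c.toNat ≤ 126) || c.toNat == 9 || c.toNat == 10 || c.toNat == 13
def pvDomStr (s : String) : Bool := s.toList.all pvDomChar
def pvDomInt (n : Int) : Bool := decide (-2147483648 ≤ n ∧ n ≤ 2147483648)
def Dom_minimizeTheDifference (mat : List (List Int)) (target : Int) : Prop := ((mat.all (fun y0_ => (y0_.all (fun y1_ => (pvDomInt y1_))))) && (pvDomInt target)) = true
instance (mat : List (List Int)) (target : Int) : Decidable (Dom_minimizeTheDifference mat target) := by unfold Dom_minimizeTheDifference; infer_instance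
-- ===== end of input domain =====

-- B replaces A's forward row-by-row set loop with a suffix-first recursion (same cost, different decomposition).

-- ===== PORT A =====
-- hashT = set({0}); for li in mat: newHashT = set(); for num in li: for val in hashT: newHashT.add(val+num); hashT = newHashT
def mtdStep (hashT : PySem.Set Int) (li : List Int) : PySem.Set Int :=
  li.foldl (fun newHashT num =>
    hashT.foldl (fun nh val => PySem.Set.add nh (val + num)) newHashT) PySem.Set.empty

def minimizeTheDifference (mat : List (List Int)) (target : Int) : Int :=
  let hashT := mat.foldl mtdStep (PySem.Set.ofList [0])
  -- min(...) raises ValueError on an empty set; Pre_ excludes that, `.getD 0` is unreachable there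
  (PySem.List.min? (hashT.map (fun num => |target - num|)) (fun x => x)).getD 0

-- ===== PORT B =====
-- sums(rows): {0} if rows empty, else {s + x for x in rows[0] for s in sums(rows[1:])}
def altSums : List (List Int) → PySem.Set Int
  | [] => PySem.Set.ofList [0]
  | row :: rest =>
      let r := altSums rest
      row.foldl (fun acc x => r.foldl (fun acc2 s => PySem.Set.add acc2 (s + x)) acc) PySem.Set.empty

def minimizeTheDifference_alt (mat : List (List Int)) (target : Int) : Int :=
  (PySem.List.min? ((altSums mat).map (fun s => |target - s|)) (fun x => x)).getD 0

-- ===== PRECONDITION & SPEC =====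
-- Pre_ excludes matrices containing an empty row: there the reachable-sum set becomes empty and
-- both A and B raise ValueError (min() of an empty sequence).
def Pre_minimizeTheDifference (mat : List (List Int)) (target : Int) : Prop :=
  ∀ li ∈ mat, li ≠ []
instance (mat : List (List Int)) (target : Int) : Decidable (Pre_minimizeTheDifference mat target) := by
  unfold Pre_minimizeTheDifference; infer_instance
def pvWitness_minimizeTheDifference : List (List Int) × Int := ([[1, 2], [3]], 2)

def Spec_minimizeTheDifference (mat : List (List Int)) (target : Int) (out : Int) : Prop := out = minimizeTheDifference_alt mat target
instance (mat : List (List Int)) (target : Int) (out : Int) : Decidable (Spec_minimizeTheDifference mat target out) := by unfold Spec_minimizeTheDifference; infer_instance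

-- ===== CLAIM (what is proved, stated in full; the proofs are below) =====
def Claim_equal_minimizeTheDifference : Prop := ∀ (mat : List (List Int)) (target : Int), Dom_minimizeTheDifference mat target → Pre_minimizeTheDifference mat target → Spec_minimizeTheDifference mat target (minimizeTheDifference mat target)

-- ===== LEMMAS AND PROOFS =====

-- a sum obtainable by choosing one element from each row (suffix-style recursion)
def ChoiceSum : List (List Int) → Int → Prop
  | [], s => s = 0
  | row :: rest, s => ∃ n ∈ row, ∃ t, ChoiceSum rest t ∧ s = t + n

theorem mem_foldl_set_add {β : Type} (f : β → Int) (l : List β) (init : PySem.Set Int) (x : Int) :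
    x ∈ l.foldl (fun acc v => PySem.Set.add acc (f v)) init ↔ x ∈ init ∨ ∃ v ∈ l, x = f v := by
  induction l generalizing init with
  | nil => simp
  | cons h t ih =>
      simp only [List.foldl_cons, ih, PySem.Set.mem_add, List.mem_cons]
      aesop

theorem mem_double_fold (S : PySem.Set Int) (li : List Int) (init : PySem.Set Int) (x : Int) :
    x ∈ li.foldl (fun nh num => S.foldl (fun nh2 val => PySem.Set.add nh2 (val + num)) nh) init ↔
      x ∈ init ∨ ∃ num ∈ li, ∃ val ∈ S, x = val + num := by
  induction li generalizing init with
  | nil => simp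
  | cons h t ih =>
      simp only [List.foldl_cons, ih, mem_foldl_set_add (fun val => val + h) S, List.mem_cons]
      aesop

theorem mem_foldl_step (rows : List (List Int)) :
    ∀ (S : PySem.Set Int) (x : Int),
      x ∈ rows.foldl mtdStep S ↔ ∃ v ∈ S, ∃ t, ChoiceSum rows t ∧ x = v + t := by
  induction rows with
  | nil => intro S x; simp [ChoiceSum]
  | cons r rs ih =>
      intro S x
      simp only [List.foldl_cons, ih, ChoiceSum]
      constructor
      · rintro ⟨v', hv', t', ht', hx⟩
        rw [mtdStep, mem_double_fold] at hv'
        rcases hv' with h1 | ⟨n, hn, v, hv, rfl⟩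
        · simp [PySem.Set.empty] at h1
        · exact ⟨v, hv, t' + n, ⟨n, hn, t', ht', rfl⟩, by omega⟩
      · rintro ⟨v, hv, t, ⟨n, hn, t', ht', rfl⟩, hx⟩
        refine ⟨v + n, ?_, t', ht', by omega⟩
        rw [mtdStep, mem_double_fold]
        exact Or.inr ⟨n, hn, v, hv, rfl⟩

theorem mem_altSums (rows : List (List Int)) : ∀ (x : Int),
    x ∈ altSums rows ↔ ChoiceSum rows x := by
  induction rows with
  | nil => intro x; simp [altSums, ChoiceSum, PySem.Set.ofList]
  | cons r rs ih =>
      intro x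
      simp only [altSums, ChoiceSum]
      rw [mem_double_fold (altSums rs) r PySem.Set.empty x]
      constructor
      · rintro (h1 | ⟨n, hn, v, hv, rfl⟩)
        · simp [PySem.Set.empty] at h1
        · exact ⟨n, hn, v, (ih v).mp hv, rfl⟩
      · rintro ⟨n, hn, t, ht, rfl⟩
        exact Or.inr ⟨n, hn, t, (ih t).mpr ht, rfl⟩

theorem mem_hashT_iff (mat : List (List Int)) (x : Int) :
    x ∈ mat.foldl mtdStep (PySem.Set.ofList [0]) ↔ ChoiceSum mat x := by
  rw [mem_foldl_step]
  constructor
  · rintro ⟨v, hv, t, ht, rfl⟩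
    simp only [PySem.Set.ofList] at hv
    simp [show v = 0 by simpa using hv, ht]
  · intro h
    exact ⟨0, by simp [PySem.Set.ofList], x, h, by omega⟩

theorem choiceSum_exists (mat : List (List Int)) (h : ∀ li ∈ mat, li ≠ []) :
    ∃ s, ChoiceSum mat s := by
  induction mat with
  | nil => exact ⟨0, rfl⟩
  | cons r rs ih =>
      obtain ⟨t, ht⟩ := ih (fun li hli => h li (List.mem_cons_of_mem r hli))
      have hr : r ≠ [] := h r List.mem_cons_self
      obtain ⟨n, hn⟩ := List.exists_mem_of_ne_nil r hr
      exact ⟨t + n, n, hn, t, ht, rfl⟩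

theorem min_getD_eq_of_mem_iff (l1 l2 : List Int) (h1 : l1 ≠ []) (h2 : l2 ≠ [])
    (hmem : ∀ x, x ∈ l1 ↔ x ∈ l2) :
    (PySem.List.min? l1 (fun x => x)).getD 0 = (PySem.List.min? l2 (fun x => x)).getD 0 := by
  obtain ⟨m1, hm1⟩ : ∃ m, PySem.List.min? l1 (fun x => x) = some m := by
    cases hm : PySem.List.min? l1 (fun x => x) with
    | none => exact absurd ((PySem.List.min?_eq_none_iff l1 (fun x => x)).mp hm) h1
    | some m => exact ⟨m, rfl⟩
  obtain ⟨m2, hm2⟩ : ∃ m, PySem.List.min? l2 (fun x => x) = some m := by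
    cases hm : PySem.List.min? l2 (fun x => x) with
    | none => exact absurd ((PySem.List.min?_eq_none_iff l2 (fun x => x)).mp hm) h2
    | some m => exact ⟨m, rfl⟩
  rw [hm1, hm2]
  have hmem1 := PySem.List.min?_mem hm1
  have hmem2 := PySem.List.min?_mem hm2
  have hle1 := PySem.List.min?_isMin hm1 m2 ((hmem m2).mpr hmem2)
  have hle2 := PySem.List.min?_isMin hm2 m1 ((hmem m1).mp hmem1)
  simpa using le_antisymm hle1 hle2

-- ===== VERDICT (by name: the statement is the Claim_ definition above) =====
theorem minimizeTheDifference_spec : Claim_equal_minimizeTheDifference := by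
  intro mat target _ hpre
  unfold Spec_minimizeTheDifference minimizeTheDifference minimizeTheDifference_alt
  obtain ⟨s0, hs0⟩ := choiceSum_exists mat hpre
  have hA : mat.foldl mtdStep (PySem.Set.ofList [0]) ≠ [] := by
    intro h
    have := (mem_hashT_iff mat s0).mpr hs0
    rw [h] at this; simp at this
  have hB : altSums mat ≠ [] := by
    intro h
    have := (mem_altSums mat s0).mpr hs0
    rw [h] at this; simp at this
  apply min_getD_eq_of_mem_iff
  · simpa using hA
  · simpa using hB
  · intro x
    simp only [List.mem_map]
    constructor
    · rintro ⟨v, hv, rfl⟩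
      exact ⟨v, (mem_altSums mat v).mpr ((mem_hashT_iff mat v).mp hv), rfl⟩
    · rintro ⟨v, hv, rfl⟩
      exact ⟨v, (mem_hashT_iff mat v).mpr ((mem_altSums mat v).mp hv), rfl⟩
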